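-- pv_equiv track=rewrite | github.com/monhacks/crystalboard | tools/text.py | process_paragraph
-- ===== SOURCE A (Python) =====
-- MAX_LINE_LENGTH = 18
--
-- CHARMAP_LENGTH = {
--       "'d": 1,
--       "'l": 1,
--       "'m": 1,
--       "'r": 1,
--       "'s": 1,
--       "'t": 1,
--       "'v": 1,
--       "#": 4,
--       "<PLAYER>": 7,
-- }
--
-- def process_word(word):
--     """
--     Return the length of a given word accounting for pokecrystal charmap and count an additional space character after the word.
--     """
--     length = len(word)
--     for char, charlen in CHARMAP_LENGTH.items():
--         length += (charlen - len(char)) * word.count(char)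
--     if length > MAX_LINE_LENGTH:
--         exc = f"Found a word too long to split (above {MAX_LINE_LENGTH} characters)."
--         raise Exception(exc)
--     return length + 1
--
-- def process_paragraph(line):
--     """
--     Split a paragraph provided in a single plain text line into multiple pokecrystal-sized lines.
--     """
--     words = line.split()
--     word_pos = 0
--     char_pos = 0
--     word_breaks = []
--     line_partitioned = []
--     while word_pos < len(words):
--         char_pos += process_word(words[word_pos])
--         if char_pos > (MAX_LINE_LENGTH + 1):
--             word_breaks.append(word_pos)
--             char_pos = 0
--             continue
--         word_pos += 1
--     start_word = 0
--     for word_break in word_breaks: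
--         line_partitioned.append(' '.join(words[start_word:word_break]))
--         start_word = word_break
--     line_partitioned.append(' '.join(words[start_word:]))
--     return line_partitioned
-- ===== SOURCE B (Python) =====
-- MAX_LINE_LENGTH = 18
--
-- CHARMAP_LENGTH = {
--       "'d": 1,
--       "'l": 1,
--       "'m": 1,
--       "'r": 1,
--       "'s": 1,
--       "'t": 1,
--       "'v": 1,
--       "#": 4,
--       "<PLAYER>": 7,
-- }
--
-- def process_word(word):
--     length = len(word)
--     for char, charlen in CHARMAP_LENGTH.items():
--         length += (charlen - len(char)) * word.count(char)
--     if length > MAX_LINE_LENGTH: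
--         exc = f"Found a word too long to split (above {MAX_LINE_LENGTH} characters)."
--         raise Exception(exc)
--     return length + 1
--
-- def process_paragraph(line):
--     """Single greedy pass: build the wrapped lines directly, word by word."""
--     lines = []
--     current = []
--     char_pos = 0
--     for word in line.split():
--         w = process_word(word)
--         if current and char_pos + w > MAX_LINE_LENGTH + 1:
--             lines.append(' '.join(current))
--             current = [word]
--             char_pos = w
--         else:
--             current.append(word)
--             char_pos += w
--     lines.append(' '.join(current))
--     return lines
-- ===== Notes on version B (the rewrite author's own statement) =====
-- stated objective: simpler
-- what changed: Replaced A's two-phase scheme (a while loop that re-reads a word after each recorded break index, then a second pass slicing the word list at those indices and joining) by a single greedy pass over the words that maintains the current line and running width and emits each wrapped line directly.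
import Mathlib
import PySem

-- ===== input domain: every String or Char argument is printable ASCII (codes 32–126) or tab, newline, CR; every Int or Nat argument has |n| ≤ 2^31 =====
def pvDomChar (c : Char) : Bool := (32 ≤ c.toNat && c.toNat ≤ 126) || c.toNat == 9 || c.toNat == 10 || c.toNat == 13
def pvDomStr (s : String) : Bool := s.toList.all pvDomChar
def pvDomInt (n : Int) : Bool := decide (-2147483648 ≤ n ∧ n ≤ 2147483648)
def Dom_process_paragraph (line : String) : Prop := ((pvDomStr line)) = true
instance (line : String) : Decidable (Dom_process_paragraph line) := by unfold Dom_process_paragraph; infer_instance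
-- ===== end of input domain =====

-- B replaces A's two-phase scheme (collect break indices, then slice) by one greedy pass
-- building the wrapped lines directly; objective: simpler.

-- ===== PORT A =====
-- CHARMAP_LENGTH as an association list in insertion order (both Pythons iterate it the same way).
def charmapLength : List (String × Int) :=
  [("'d", 1), ("'l", 1), ("'m", 1), ("'r", 1), ("'s", 1), ("'t", 1), ("'v", 1), ("#", 4), ("<PLAYER>", 7)]

-- the 'length' computed by process_word before the length check
def wordLength (word : String) : Int :=
  charmapLength.foldl
    (fun length p => length + (p.2 - (PySem.Str.len p.1 : Int)) * (PySem.Str.count word p.1 : Int))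
    (PySem.Str.len word : Int)

-- process_word: none = the Exception raised for a too-long word; else length + 1
def processWord (word : String) : Option Int :=
  if wordLength word > 18 then none else some (wordLength word + 1)

-- cited by loopA's decreasing_by
theorem processWord_bound (w : String) (n : Int) (h : processWord w = some n) : n ≤ 19 := by
  unfold processWord at h
  split at h
  · exact absurd h (by simp)
  · simp only [Option.some.injEq] at h; omega

-- A's while loop: collects the break indices (word_breaks); on the word-too-long
-- exception (processWord = none, excluded by Pre_) it stops with the breaks so far.
def loopA (ws : List String) (pos : Nat) (cp : Int) (breaks : List Nat) : List Nat :=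
  if h : pos < ws.length then
    match hpw : processWord ws[pos] with
    | none => breaks
    | some w =>
      if cp + w > 19 then loopA ws pos 0 (breaks ++ [pos])
      else loopA ws (pos + 1) (cp + w) breaks
  else breaks
termination_by (ws.length - pos) * 2 + (if 0 < cp then 1 else 0)
decreasing_by
  · have hb := processWord_bound _ _ hpw
    have hcp : 0 < cp := by omega
    rw [if_pos hcp, if_neg (lt_irrefl (0:Int))]
    omega
  · split_ifs <;> omega

-- A's second phase: for word_break in word_breaks: append ' '.join(words[start:word_break]); final ' '.join(words[start:])
def partAux (ws : List String) (start : Nat) (bs : List Nat) (acc : List String) : List String :=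
  match bs with
  | [] => acc ++ [PySem.Str.join " " (PySem.List.slice ws (some (start : Int)) none)]
  | b :: bs' =>
      partAux ws b bs' (acc ++ [PySem.Str.join " " (PySem.List.slice ws (some (start : Int)) (some (b : Int)))])

def process_paragraph (line : String) : List String :=
  let words := PySem.Str.split₀ line
  partAux words 0 (loopA words 0 0 []) []

-- ===== PORT B =====
-- B's single greedy pass: current line of words, running char_pos, output lines built directly.
def loopB (rest : List String) (cur : List String) (cp : Int) (acc : List String) : List String :=
  match rest with
  | [] => acc ++ [PySem.Str.join " " cur]
  | w :: rest' =>
    match processWord w with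
    | none => acc   -- the word-too-long exception (outside Pre_)
    | some l =>
      if cur ≠ [] ∧ cp + l > 19 then
        loopB rest' [w] l (acc ++ [PySem.Str.join " " cur])
      else loopB rest' (cur ++ [w]) (cp + l) acc

def process_paragraph_alt (line : String) : List String :=
  loopB (PySem.Str.split₀ line) [] 0 []

-- ===== PRECONDITION & SPEC =====
-- Pre_ excludes exactly the lines containing a word of charmap-adjusted length above 18,
-- on which A's process_word raises Exception (B raises the same exception there).
def Pre_process_paragraph (line : String) : Prop :=
  ∀ w ∈ PySem.Str.split₀ line, wordLength w ≤ 18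

instance (line : String) : Decidable (Pre_process_paragraph line) := by
  unfold Pre_process_paragraph; infer_instance

def pvWitness_process_paragraph : String := "OAK: Hello there! Welcome to the world of POKEMON!"

def Spec_process_paragraph (line : String) (out : List String) : Prop := out = process_paragraph_alt line
instance (line : String) (out : List String) : Decidable (Spec_process_paragraph line out) := by unfold Spec_process_paragraph; infer_instance

-- ===== CLAIM (what is proved, stated in full; the proofs are below) =====
def Claim_equal_process_paragraph : Prop := ∀ (line : String), Dom_process_paragraph line → Pre_process_paragraph line → Spec_process_paragraph line (process_paragraph line)

-- ===== LEMMAS AND PROOFS =====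

theorem loopA_stop (ws : List String) (pos : Nat) (cp : Int) (bs : List Nat)
    (h : ¬ pos < ws.length) : loopA ws pos cp bs = bs := by
  rw [loopA, dif_neg h]

theorem loopA_none (ws : List String) (pos : Nat) (cp : Int) (bs : List Nat)
    (h : pos < ws.length) (hw : processWord ws[pos] = none) : loopA ws pos cp bs = bs := by
  rw [loopA, dif_pos h]
  split
  · rfl
  · next w' heq => rw [heq] at hw; simp at hw

theorem loopA_some (ws : List String) (pos : Nat) (cp : Int) (bs : List Nat) (w : Int)
    (h : pos < ws.length) (hw : processWord ws[pos] = some w) :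
    loopA ws pos cp bs =
      if cp + w > 19 then loopA ws pos 0 (bs ++ [pos]) else loopA ws (pos + 1) (cp + w) bs := by
  rw [loopA, dif_pos h]
  split
  · next heq => rw [heq] at hw; simp at hw
  · next w' heq => rw [heq] at hw; injection hw with e; subst e; rfl

theorem loopB_nil (cur : List String) (cp : Int) (acc : List String) :
    loopB [] cur cp acc = acc ++ [PySem.Str.join " " cur] := rfl

theorem loopB_cons (w : String) (rest cur : List String) (cp l : Int) (acc : List String)
    (hw : processWord w = some l) :
    loopB (w :: rest) cur cp acc =
      if cur ≠ [] ∧ cp + l > 19 then loopB rest [w] l (acc ++ [PySem.Str.join " " cur])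
      else loopB rest (cur ++ [w]) (cp + l) acc := by
  have h : loopB (w :: rest) cur cp acc = (match processWord w with
    | none => acc
    | some l => if cur ≠ [] ∧ cp + l > 19 then loopB rest [w] l (acc ++ [PySem.Str.join " " cur])
      else loopB rest (cur ++ [w]) (cp + l) acc) := rfl
  rw [h, hw]

theorem partAux_nil (ws : List String) (start : Nat) (acc : List String) :
    partAux ws start [] acc = acc ++ [PySem.Str.join " " (PySem.List.slice ws (some (start : Int)) none)] := rfl

theorem partAux_cons (ws : List String) (start b : Nat) (bs : List Nat) (acc : List String) :
    partAux ws start (b :: bs) acc =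
      partAux ws b bs (acc ++ [PySem.Str.join " " (PySem.List.slice ws (some (start : Int)) (some (b : Int)))]) := rfl

theorem loopA_append (k : Nat) (ws : List String) (pos : Nat) (cp : Int) (bs : List Nat)
    (hk : (ws.length - pos) * 2 + (if 0 < cp then 1 else 0) ≤ k) :
    loopA ws pos cp bs = bs ++ loopA ws pos cp [] := by
  induction k generalizing pos cp bs with
  | zero =>
    have hpos : ¬ pos < ws.length := by split_ifs at hk <;> omega
    rw [loopA_stop ws pos cp bs hpos, loopA_stop ws pos cp [] hpos]; simp
  | succ k ih =>
    by_cases hpos : pos < ws.length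
    · cases hpw : processWord ws[pos] with
      | none => rw [loopA_none ws pos cp bs hpos hpw, loopA_none ws pos cp [] hpos hpw]; simp
      | some w =>
        have hb := processWord_bound _ _ hpw
        by_cases hbr : cp + w > 19
        · have hcp : 0 < cp := by omega
          have hk' : (ws.length - pos) * 2 + 1 ≤ k + 1 := by rw [if_pos hcp] at hk; exact hk
          have hm : (ws.length - pos) * 2 + (if (0:Int) < 0 then 1 else 0) ≤ k := by
            rw [if_neg (lt_irrefl (0:Int))]; omega
          rw [loopA_some ws pos cp bs w hpos hpw, loopA_some ws pos cp [] w hpos hpw,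
              if_pos hbr, if_pos hbr, ih pos 0 (bs ++ [pos]) hm, ih pos 0 ([] ++ [pos]) hm]
          simp
        · rw [loopA_some ws pos cp bs w hpos hpw, loopA_some ws pos cp [] w hpos hpw,
              if_neg hbr, if_neg hbr]
          exact ih (pos + 1) (cp + w) bs (by split_ifs at hk ⊢ <;> omega)
    · rw [loopA_stop ws pos cp bs hpos, loopA_stop ws pos cp [] hpos]; simp

theorem key_base (ws : List String) (pos start : Nat) (cp : Int) (acc : List String)
    (hsp : start ≤ pos) (hpl : pos = ws.length) :
    partAux ws start (loopA ws pos cp []) acc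
      = loopB (ws.drop pos) ((ws.drop start).take (pos - start)) cp acc := by
  subst hpl
  rw [loopA_stop ws ws.length cp [] (lt_irrefl _), partAux_nil, List.drop_length, loopB_nil,
      PySem.List.slice_from_natCast, List.take_of_length_le (by simp)]

theorem key_lemma (ws : List String) (hws : ∀ w ∈ ws, wordLength w ≤ 18)
    (n : Nat) : ∀ (pos start : Nat) (cp : Int) (acc : List String),
    ws.length - pos ≤ n → start ≤ pos → pos ≤ ws.length → (start = pos → cp = 0) →
    partAux ws start (loopA ws pos cp []) acc
      = loopB (ws.drop pos) ((ws.drop start).take (pos - start)) cp acc := by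
  induction n with
  | zero =>
    intro pos start cp acc hn hsp hpl hz
    exact key_base ws pos start cp acc hsp (by omega)
  | succ n ih =>
    intro pos start cp acc hn hsp hpl hz
    by_cases hpos : pos < ws.length
    · have hdrop : ws.drop pos = ws[pos] :: ws.drop (pos + 1) :=
        (List.getElem_cons_drop hpos).symm
      have hw18 : wordLength ws[pos] ≤ 18 := hws _ (List.getElem_mem hpos)
      have hpw : processWord ws[pos] = some (wordLength ws[pos] + 1) := by
        unfold processWord; rw [if_neg (by omega)]
      set w : Int := wordLength ws[pos] + 1 with hwdef
      have hble : w ≤ 19 := by omega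
      rw [loopA_some ws pos cp [] w hpos hpw]
      by_cases hbr : cp + w > 19
      · -- break: A records pos and re-reads the word with cp = 0
        have hcp : 0 < cp := by omega
        have hslt : start < pos := by
          rcases Nat.lt_or_ge start pos with h | h
          · exact h
          · have heq : start = pos := by omega
            exact absurd (hz heq) (by omega)
        have hcur : (ws.drop start).take (pos - start) ≠ [] := by
          have hlen : ((ws.drop start).take (pos - start)).length = pos - start := by
            simp; omega
          intro hnil; rw [hnil] at hlen; simp at hlen; omega
        rw [if_pos hbr, List.nil_append,
            loopA_append ((ws.length - pos) * 2 + 1) ws pos 0 [pos]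
              (by rw [if_neg (lt_irrefl (0:Int))]; omega),
            List.singleton_append, partAux_cons, PySem.List.slice_natCast,
            loopA_some ws pos 0 [] w hpos hpw, if_neg (by omega), zero_add]
        have hstep := ih (pos + 1) pos w (acc ++ [PySem.Str.join " " ((ws.drop start).take (pos - start))])
          (by omega) (by omega) (by omega) (by omega)
        rw [hstep, hdrop, loopB_cons _ _ _ _ _ _ hpw, if_pos ⟨hcur, hbr⟩]
        congr 1
        rw [show pos + 1 - pos = 1 by omega]
        rfl
      · -- no break: both sides append the word to the current line
        rw [if_neg hbr]
        have hstep := ih (pos + 1) start (cp + w) acc (by omega) (by omega) (by omega) (by omega)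
        rw [hstep, hdrop, loopB_cons _ _ _ _ _ _ hpw,
            if_neg (by rintro ⟨-, h⟩; exact hbr h)]
        have hidx : pos - start < (ws.drop start).length := by rw [List.length_drop]; omega
        have hget : (ws.drop start)[pos - start]'hidx = ws[pos]'hpos := by
          rw [List.getElem_drop]
          congr 1
          omega
        have hcur1 : (ws.drop start).take (pos + 1 - start)
            = (ws.drop start).take (pos - start) ++ [ws[pos]'hpos] := by
          rw [show pos + 1 - start = (pos - start) + 1 by omega, List.take_add_one,
              List.getElem?_eq_getElem hidx]
          simp only [Option.toList_some, hget]
        rw [hcur1]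
    · exact key_base ws pos start cp acc hsp (by omega)

-- ===== VERDICT (by name: the statement is the Claim_ definition above) =====
theorem process_paragraph_spec : Claim_equal_process_paragraph := by
  intro line _ hpre
  unfold Spec_process_paragraph process_paragraph process_paragraph_alt
  have h := key_lemma (PySem.Str.split₀ line) hpre ((PySem.Str.split₀ line).length)
    0 0 0 [] (by omega) (by omega) (by omega) (fun _ => rfl)
  simpa using h
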